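-- pv_equiv track=rewrite | github.com/ebony72/Mahjong | utils/pusolx.py | sol6
-- ===== SOURCE A (Python) =====
-- def sol3(V):
--     if V[0] == V[1] == V[2]:
--         return True
--     if V[1] == V[0] + 1 and V[2] == V[1] + 1:
--         return True
--     return False
--
-- def sol6(V):
--     if V[0] >= V[4] or V[1] >=V[5]:
--         return False
--     for i in range(0,5):
--         if V[i] > V[i+1]:
--             return False
--     if (sol3([V[0], V[1], V[2]]) and sol3([V[3], V[4], V[5]])):
--         #include the cases 111123, 111234, and 123333
--         return True
--     elif V[0] == V[1] and V[2] == V[3] and V[4] == V[5] and sol3([V[0], V[2], V[4]]): #112233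
--         return True
--     elif V[1] == V[2] and V[3] == V[4] and V[5] == V[4] + 1 and \
--          (sol3([V[0], V[1], V[3]]) or sol3([V[0], V[1], V[5]])) : #122334 or 122223
--         return True
--     return False
-- ===== SOURCE B (Python) =====
-- def _meld(m):
--     x, y, z = m
--     return x == y == z or (y == x + 1 and z == y + 1)
--
-- def _splits(xs, k):
--     """All ways to choose k elements of xs (keeping order), paired with the complement."""
--     if k == 0:
--         return [([], list(xs))]
--     if not xs:
--         return []
--     head, tail = xs[0], xs[1:]
--     res = [([head] + ch, rs) for ch, rs in _splits(tail, k - 1)]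
--     res += [(ch, [head] + rs) for ch, rs in _splits(tail, k)]
--     return res
--
-- def sol6(V):
--     t = [V[0], V[1], V[2], V[3], V[4], V[5]]
--     for x, y in zip(t, t[1:]):
--         if x > y:
--             return False
--     if t[0] == t[5]:  # six identical tiles: no such hand (only four copies of a tile exist)
--         return False
--     return any(_meld(p) and _meld(q) for p, q in _splits(t, 3))
-- ===== Notes on version B (the rewrite author's own statement) =====
-- stated objective: alternative
-- what changed: B replaces A's hard-coded ladder of sorted 6-tile patterns (two consecutive melds, 112233, 122334/122223) by a search over all 20 ways to split the six sorted tiles into two index-triples, accepting iff some split makes both triples a meld (with the six-identical hand rejected, as only four copies of a tile exist).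
-- outside the precondition, e.g. on sol6([5, 1, 2, 3, 4]): A returns False, B raises IndexError; on sol6([3, 3, 3, 3, 3]): A returns False, B raises IndexError
import Mathlib
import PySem

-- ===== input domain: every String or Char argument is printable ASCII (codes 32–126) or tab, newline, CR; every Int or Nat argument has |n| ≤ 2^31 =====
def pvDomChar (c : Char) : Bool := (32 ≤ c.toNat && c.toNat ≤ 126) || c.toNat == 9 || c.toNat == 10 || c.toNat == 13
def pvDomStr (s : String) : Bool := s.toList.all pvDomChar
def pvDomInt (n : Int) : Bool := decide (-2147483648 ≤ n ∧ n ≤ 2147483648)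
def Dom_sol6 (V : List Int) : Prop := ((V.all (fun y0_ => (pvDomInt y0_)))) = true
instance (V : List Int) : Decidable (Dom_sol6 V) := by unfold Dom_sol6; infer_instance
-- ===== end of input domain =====

-- B replaces A's hard-coded ladder of sorted 6-tile patterns by a recursive enumeration of all
-- ways to split the six tiles into two triples, accepting iff some split makes both triples a meld
-- (alternative algorithm, same cost).

-- ===== PORT A =====
def sol3 (V : List Int) : Bool :=
  if PySem.List.pyGetD V 0 0 == PySem.List.pyGetD V 1 0 &&
     PySem.List.pyGetD V 1 0 == PySem.List.pyGetD V 2 0 then true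
  else if PySem.List.pyGetD V 1 0 == PySem.List.pyGetD V 0 0 + 1 &&
          PySem.List.pyGetD V 2 0 == PySem.List.pyGetD V 1 0 + 1 then true
  else false

def sol6 (V : List Int) : Bool :=
  let g := fun (i : Int) => PySem.List.pyGetD V i 0
  if g 0 ≥ g 4 || g 1 ≥ g 5 then false
  else if (PySem.List.pyRange 0 5 1).any (fun i => g i > g (i + 1)) then false
  else if sol3 [g 0, g 1, g 2] && sol3 [g 3, g 4, g 5] then true
  else if g 0 == g 1 && g 2 == g 3 && g 4 == g 5 && sol3 [g 0, g 2, g 4] then true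
  else if g 1 == g 2 && g 3 == g 4 && g 5 == g 4 + 1 &&
          (sol3 [g 0, g 1, g 3] || sol3 [g 0, g 1, g 5]) then true
  else false

-- ===== PORT B =====
-- _meld(m) unpacks a 3-list (B only ever calls it on 3-lists); other shapes map to false
def meldL : List Int → Bool
  | [x, y, z] => (x == y && y == z) || (y == x + 1 && z == y + 1)
  | _ => false

-- _splits(xs, k): all ways to choose k elements (keeping order) paired with the complement
def splitsB : List Int → Nat → List (List Int × List Int)
  | xs, 0 => [([], xs)]
  | [], _ + 1 => []
  | x :: xs, k + 1 =>
      ((splitsB xs k).map (fun p => (x :: p.1, p.2))) ++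
      ((splitsB xs (k + 1)).map (fun p => (p.1, x :: p.2)))

def sol6_alt (V : List Int) : Bool :=
  let t : List Int := [PySem.List.pyGetD V 0 0, PySem.List.pyGetD V 1 0, PySem.List.pyGetD V 2 0,
                       PySem.List.pyGetD V 3 0, PySem.List.pyGetD V 4 0, PySem.List.pyGetD V 5 0]
  if (t.zip (PySem.List.slice t (some 1) none)).any (fun p => p.1 > p.2) then false
  else if PySem.List.pyGetD t 0 0 == PySem.List.pyGetD t 5 0 then false
  else (splitsB t 3).any (fun pq => meldL pq.1 && meldL pq.2)

-- ===== PRECONDITION & SPEC =====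
-- Pre_ excludes lists with fewer than 6 elements: there A raises IndexError except when
-- short-circuit evaluation returns False before the out-of-range read; B always raises there.
def Pre_sol6 (V : List Int) : Prop := 6 ≤ V.length
instance (V : List Int) : Decidable (Pre_sol6 V) := by unfold Pre_sol6; infer_instance
def pvWitness_sol6 : List Int := [1, 1, 1, 2, 3, 4]
def Spec_sol6 (V : List Int) (out : Bool) : Prop := out = sol6_alt V
instance (V : List Int) (out : Bool) : Decidable (Spec_sol6 V out) := by unfold Spec_sol6; infer_instance

-- ===== CLAIM (what is proved, stated in full; the proofs are below) =====
def Claim_equal_sol6 : Prop := ∀ (V : List Int), Dom_sol6 V → Pre_sol6 V → Spec_sol6 V (sol6 V)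

-- ===== LEMMAS AND PROOFS =====
-- A's result on a ≥6-element list, as a formula in the first six elements
def LA (a b c d e f : Int) : Prop :=
  (a < e ∧ b < f) ∧
    (a ≤ b ∧ b ≤ c ∧ c ≤ d ∧ d ≤ e ∧ e ≤ f) ∧
      ((a = b ∧ b = c ∨ b = a + 1 ∧ c = b + 1) ∧ (d = e ∧ e = f ∨ e = d + 1 ∧ f = e + 1) ∨
        ((a = b ∧ c = d) ∧ e = f) ∧ (a = c ∧ c = e ∨ c = a + 1 ∧ e = c + 1) ∨
          ((b = c ∧ d = e) ∧ f = e + 1) ∧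
            ((a = b ∧ b = d ∨ b = a + 1 ∧ d = b + 1) ∨ a = b ∧ b = f ∨ b = a + 1 ∧ f = b + 1))

-- B's result on a ≥6-element list: sorted, not all equal, and some 3+3 split into two melds
def LB (a b c d e f : Int) : Prop :=
  (a ≤ b ∧ b ≤ c ∧ c ≤ d ∧ d ≤ e ∧ e ≤ f) ∧
    ¬a = f ∧
      ((a = b ∧ b = c ∨ b = a + 1 ∧ c = b + 1) ∧ (d = e ∧ e = f ∨ e = d + 1 ∧ f = e + 1) ∨
        (a = b ∧ b = d ∨ b = a + 1 ∧ d = b + 1) ∧ (c = e ∧ e = f ∨ e = c + 1 ∧ f = e + 1) ∨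
          (a = b ∧ b = e ∨ b = a + 1 ∧ e = b + 1) ∧ (c = d ∧ d = f ∨ d = c + 1 ∧ f = d + 1) ∨
            (a = b ∧ b = f ∨ b = a + 1 ∧ f = b + 1) ∧ (c = d ∧ d = e ∨ d = c + 1 ∧ e = d + 1) ∨
              (a = c ∧ c = d ∨ c = a + 1 ∧ d = c + 1) ∧ (b = e ∧ e = f ∨ e = b + 1 ∧ f = e + 1) ∨
                (a = c ∧ c = e ∨ c = a + 1 ∧ e = c + 1) ∧ (b = d ∧ d = f ∨ d = b + 1 ∧ f = d + 1) ∨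
                  (a = c ∧ c = f ∨ c = a + 1 ∧ f = c + 1) ∧ (b = d ∧ d = e ∨ d = b + 1 ∧ e = d + 1) ∨
                    (a = d ∧ d = e ∨ d = a + 1 ∧ e = d + 1) ∧ (b = c ∧ c = f ∨ c = b + 1 ∧ f = c + 1) ∨
                      (a = d ∧ d = f ∨ d = a + 1 ∧ f = d + 1) ∧ (b = c ∧ c = e ∨ c = b + 1 ∧ e = c + 1) ∨
                        (a = e ∧ e = f ∨ e = a + 1 ∧ f = e + 1) ∧ (b = c ∧ c = d ∨ c = b + 1 ∧ d = c + 1) ∨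
                          (b = c ∧ c = d ∨ c = b + 1 ∧ d = c + 1) ∧ (a = e ∧ e = f ∨ e = a + 1 ∧ f = e + 1) ∨
                            (b = c ∧ c = e ∨ c = b + 1 ∧ e = c + 1) ∧ (a = d ∧ d = f ∨ d = a + 1 ∧ f = d + 1) ∨
                              (b = c ∧ c = f ∨ c = b + 1 ∧ f = c + 1) ∧ (a = d ∧ d = e ∨ d = a + 1 ∧ e = d + 1) ∨
                                (b = d ∧ d = e ∨ d = b + 1 ∧ e = d + 1) ∧ (a = c ∧ c = f ∨ c = a + 1 ∧ f = c + 1) ∨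
                                  (b = d ∧ d = f ∨ d = b + 1 ∧ f = d + 1) ∧ (a = c ∧ c = e ∨ c = a + 1 ∧ e = c + 1) ∨
                                    (b = e ∧ e = f ∨ e = b + 1 ∧ f = e + 1) ∧ (a = c ∧ c = d ∨ c = a + 1 ∧ d = c + 1) ∨
                                      (c = d ∧ d = e ∨ d = c + 1 ∧ e = d + 1) ∧ (a = b ∧ b = f ∨ b = a + 1 ∧ f = b + 1) ∨
                                        (c = d ∧ d = f ∨ d = c + 1 ∧ f = d + 1) ∧ (a = b ∧ b = e ∨ b = a + 1 ∧ e = b + 1) ∨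
                                          (c = e ∧ e = f ∨ e = c + 1 ∧ f = e + 1) ∧ (a = b ∧ b = d ∨ b = a + 1 ∧ d = b + 1) ∨
                                            (d = e ∧ e = f ∨ e = d + 1 ∧ f = e + 1) ∧ (a = b ∧ b = c ∨ b = a + 1 ∧ c = b + 1))

lemma slice6_one {x0 x1 x2 x3 x4 x5 : Int} :
    PySem.List.slice [x0, x1, x2, x3, x4, x5] (some 1) none = [x1, x2, x3, x4, x5] := rfl

lemma evalA (a b c d e f : Int) (rest : List Int) :
    sol6 (a :: b :: c :: d :: e :: f :: rest) = true ↔ LA a b c d e f := by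
  simp only [sol6, sol3, LA, show PySem.List.pyRange 0 5 1 = [0, 1, 2, 3, 4] from rfl,
    List.any_cons, List.any_nil]
  norm_num [PySem.List.pyGetD_ofNat', List.getD]

lemma evalB (a b c d e f : Int) (rest : List Int) :
    sol6_alt (a :: b :: c :: d :: e :: f :: rest) = true ↔ LB a b c d e f := by
  simp only [sol6_alt, meldL, splitsB, LB, slice6_one, List.zip_cons_cons, List.zip_nil_right,
    List.map, List.cons_append, List.nil_append, List.any_cons, List.any_nil]
  norm_num [PySem.List.pyGetD_ofNat', List.getD]

lemma fwd (a b c d e f : Int) : LA a b c d e f → LB a b c d e f := by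
  intro h
  obtain ⟨⟨hae, hbf⟩, hs, hc⟩ := h
  refine ⟨hs, by omega, ?_⟩
  rcases hc with ⟨h1, h2⟩ | ⟨h1, h2⟩ | ⟨h1, h2⟩
  · -- two consecutive melds: split (0,1,2)/(3,4,5)
    exact Or.inl ⟨h1, h2⟩
  · -- 112233: split (0,2,4)/(1,3,5)
    rcases h2 with ⟨h3, h4⟩ | ⟨h3, h4⟩
    · exact Or.inr (Or.inr (Or.inr (Or.inr (Or.inr (Or.inl
        ⟨Or.inl ⟨by omega, by omega⟩, Or.inl ⟨by omega, by omega⟩⟩)))))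
    · exact Or.inr (Or.inr (Or.inr (Or.inr (Or.inr (Or.inl
        ⟨Or.inr ⟨by omega, by omega⟩, Or.inr ⟨by omega, by omega⟩⟩)))))
  · -- 122334 / 122223
    rcases h2 with (⟨h3, h4⟩ | ⟨h3, h4⟩) | ⟨h3, h4⟩ | ⟨h3, h4⟩
    · exact (show False by omega).elim
    · -- 122334: split (0,1,3)/(2,4,5)
      exact Or.inr (Or.inr (Or.inr (Or.inr (Or.inr (Or.inr (Or.inr (Or.inr (Or.inr (Or.inr
        (Or.inr (Or.inr (Or.inr (Or.inr (Or.inr (Or.inr (Or.inr (Or.inr (Or.inl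
        ⟨Or.inr ⟨by omega, by omega⟩, Or.inr ⟨by omega, by omega⟩⟩))))))))))))))))))
    · exact (show False by omega).elim
    · -- 122223: split (0,1,5)/(2,3,4)
      exact Or.inr (Or.inr (Or.inr (Or.inl
        ⟨Or.inr ⟨by omega, by omega⟩, Or.inl ⟨by omega, by omega⟩⟩)))

set_option maxHeartbeats 1000000 in
lemma bwd (a b c d e f : Int) : LB a b c d e f → LA a b c d e f := by
  intro h
  obtain ⟨hs, hne, hd⟩ := h
  unfold LA
  rcases hd with h0 | h1 | h2 | h3 | h4 | h5 | h6 | h7 | h8 | h9 | h10 | h11 | h12 | h13 | h14 | h15 | h16 | h17 | h18 | h19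
  · rcases h0 with ⟨hp | hp, hq | hq⟩
    · exact ⟨⟨by omega, by omega⟩, hs, Or.inl (⟨Or.inl ⟨by omega, by omega⟩, Or.inl ⟨by omega, by omega⟩⟩)⟩
    · exact ⟨⟨by omega, by omega⟩, hs, Or.inl (⟨Or.inl ⟨by omega, by omega⟩, Or.inr ⟨by omega, by omega⟩⟩)⟩
    · exact ⟨⟨by omega, by omega⟩, hs, Or.inl (⟨Or.inr ⟨by omega, by omega⟩, Or.inl ⟨by omega, by omega⟩⟩)⟩
    · exact ⟨⟨by omega, by omega⟩, hs, Or.inl (⟨Or.inr ⟨by omega, by omega⟩, Or.inr ⟨by omega, by omega⟩⟩)⟩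
  · rcases h1 with ⟨hp | hp, hq | hq⟩
    · exact (show False by omega).elim
    · exact ⟨⟨by omega, by omega⟩, hs, Or.inl (⟨Or.inl ⟨by omega, by omega⟩, Or.inr ⟨by omega, by omega⟩⟩)⟩
    · exact ⟨⟨by omega, by omega⟩, hs, Or.inl (⟨Or.inr ⟨by omega, by omega⟩, Or.inl ⟨by omega, by omega⟩⟩)⟩
    · omega
  · rcases h2 with ⟨hp | hp, hq | hq⟩
    · exact (show False by omega).elim
    · exact (show False by omega).elim
    · exact ⟨⟨by omega, by omega⟩, hs, Or.inl (⟨Or.inr ⟨by omega, by omega⟩, Or.inl ⟨by omega, by omega⟩⟩)⟩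
    · exact ⟨⟨by omega, by omega⟩, hs, Or.inr (Or.inr ⟨⟨⟨by omega, by omega⟩, by omega⟩, Or.inl (Or.inr ⟨by omega, by omega⟩)⟩)⟩
  · rcases h3 with ⟨hp | hp, hq | hq⟩
    · exact (show False by omega).elim
    · exact (show False by omega).elim
    · omega
    · exact (show False by omega).elim
  · rcases h4 with ⟨hp | hp, hq | hq⟩
    · exact (show False by omega).elim
    · exact ⟨⟨by omega, by omega⟩, hs, Or.inl (⟨Or.inl ⟨by omega, by omega⟩, Or.inr ⟨by omega, by omega⟩⟩)⟩
    · exact (show False by omega).elim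
    · exact ⟨⟨by omega, by omega⟩, hs, Or.inr (Or.inr ⟨⟨⟨by omega, by omega⟩, by omega⟩, Or.inl (Or.inr ⟨by omega, by omega⟩)⟩)⟩
  · rcases h5 with ⟨hp | hp, hq | hq⟩
    · exact (show False by omega).elim
    · exact (show False by omega).elim
    · exact (show False by omega).elim
    · omega
  · rcases h6 with ⟨hp | hp, hq | hq⟩
    · exact (show False by omega).elim
    · exact (show False by omega).elim
    · exact ⟨⟨by omega, by omega⟩, hs, Or.inr (Or.inr ⟨⟨⟨by omega, by omega⟩, by omega⟩, Or.inr (Or.inr ⟨by omega, by omega⟩)⟩)⟩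
    · exact ⟨⟨by omega, by omega⟩, hs, Or.inr (Or.inl ⟨⟨⟨by omega, by omega⟩, by omega⟩, Or.inr ⟨by omega, by omega⟩⟩)⟩
  · rcases h7 with ⟨hp | hp, hq | hq⟩
    · exact (show False by omega).elim
    · exact (show False by omega).elim
    · exact (show False by omega).elim
    · exact ⟨⟨by omega, by omega⟩, hs, Or.inr (Or.inl ⟨⟨⟨by omega, by omega⟩, by omega⟩, Or.inr ⟨by omega, by omega⟩⟩)⟩
  · rcases h8 with ⟨hp | hp, hq | hq⟩
    · exact (show False by omega).elim
    · exact (show False by omega).elim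
    · exact ⟨⟨by omega, by omega⟩, hs, Or.inr (Or.inr ⟨⟨⟨by omega, by omega⟩, by omega⟩, Or.inr (Or.inr ⟨by omega, by omega⟩)⟩)⟩
    · exact ⟨⟨by omega, by omega⟩, hs, Or.inr (Or.inl ⟨⟨⟨by omega, by omega⟩, by omega⟩, Or.inr ⟨by omega, by omega⟩⟩)⟩
  · rcases h9 with ⟨hp | hp, hq | hq⟩
    · exact (show False by omega).elim
    · exact (show False by omega).elim
    · omega
    · exact (show False by omega).elim
  · rcases h10 with ⟨hp | hp, hq | hq⟩
    · exact (show False by omega).elim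
    · omega
    · exact (show False by omega).elim
    · exact (show False by omega).elim
  · rcases h11 with ⟨hp | hp, hq | hq⟩
    · exact (show False by omega).elim
    · exact ⟨⟨by omega, by omega⟩, hs, Or.inr (Or.inr ⟨⟨⟨by omega, by omega⟩, by omega⟩, Or.inr (Or.inr ⟨by omega, by omega⟩)⟩)⟩
    · exact (show False by omega).elim
    · exact ⟨⟨by omega, by omega⟩, hs, Or.inr (Or.inl ⟨⟨⟨by omega, by omega⟩, by omega⟩, Or.inr ⟨by omega, by omega⟩⟩)⟩
  · rcases h12 with ⟨hp | hp, hq | hq⟩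
    · exact (show False by omega).elim
    · exact (show False by omega).elim
    · exact (show False by omega).elim
    · exact ⟨⟨by omega, by omega⟩, hs, Or.inr (Or.inl ⟨⟨⟨by omega, by omega⟩, by omega⟩, Or.inr ⟨by omega, by omega⟩⟩)⟩
  · rcases h13 with ⟨hp | hp, hq | hq⟩
    · exact (show False by omega).elim
    · exact ⟨⟨by omega, by omega⟩, hs, Or.inr (Or.inr ⟨⟨⟨by omega, by omega⟩, by omega⟩, Or.inr (Or.inr ⟨by omega, by omega⟩)⟩)⟩
    · exact (show False by omega).elim
    · exact ⟨⟨by omega, by omega⟩, hs, Or.inr (Or.inl ⟨⟨⟨by omega, by omega⟩, by omega⟩, Or.inr ⟨by omega, by omega⟩⟩)⟩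
  · rcases h14 with ⟨hp | hp, hq | hq⟩
    · exact (show False by omega).elim
    · exact (show False by omega).elim
    · exact (show False by omega).elim
    · omega
  · rcases h15 with ⟨hp | hp, hq | hq⟩
    · exact (show False by omega).elim
    · exact (show False by omega).elim
    · exact ⟨⟨by omega, by omega⟩, hs, Or.inl (⟨Or.inl ⟨by omega, by omega⟩, Or.inr ⟨by omega, by omega⟩⟩)⟩
    · exact ⟨⟨by omega, by omega⟩, hs, Or.inr (Or.inr ⟨⟨⟨by omega, by omega⟩, by omega⟩, Or.inl (Or.inr ⟨by omega, by omega⟩)⟩)⟩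
  · rcases h16 with ⟨hp | hp, hq | hq⟩
    · exact (show False by omega).elim
    · omega
    · exact (show False by omega).elim
    · exact (show False by omega).elim
  · rcases h17 with ⟨hp | hp, hq | hq⟩
    · exact (show False by omega).elim
    · exact ⟨⟨by omega, by omega⟩, hs, Or.inl (⟨Or.inr ⟨by omega, by omega⟩, Or.inl ⟨by omega, by omega⟩⟩)⟩
    · exact (show False by omega).elim
    · exact ⟨⟨by omega, by omega⟩, hs, Or.inr (Or.inr ⟨⟨⟨by omega, by omega⟩, by omega⟩, Or.inl (Or.inr ⟨by omega, by omega⟩)⟩)⟩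
  · rcases h18 with ⟨hp | hp, hq | hq⟩
    · exact (show False by omega).elim
    · exact ⟨⟨by omega, by omega⟩, hs, Or.inl (⟨Or.inr ⟨by omega, by omega⟩, Or.inl ⟨by omega, by omega⟩⟩)⟩
    · exact ⟨⟨by omega, by omega⟩, hs, Or.inl (⟨Or.inl ⟨by omega, by omega⟩, Or.inr ⟨by omega, by omega⟩⟩)⟩
    · omega
  · rcases h19 with ⟨hp | hp, hq | hq⟩
    · exact ⟨⟨by omega, by omega⟩, hs, Or.inl (⟨Or.inl ⟨by omega, by omega⟩, Or.inl ⟨by omega, by omega⟩⟩)⟩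
    · exact ⟨⟨by omega, by omega⟩, hs, Or.inl (⟨Or.inr ⟨by omega, by omega⟩, Or.inl ⟨by omega, by omega⟩⟩)⟩
    · exact ⟨⟨by omega, by omega⟩, hs, Or.inl (⟨Or.inl ⟨by omega, by omega⟩, Or.inr ⟨by omega, by omega⟩⟩)⟩
    · exact ⟨⟨by omega, by omega⟩, hs, Or.inl (⟨Or.inr ⟨by omega, by omega⟩, Or.inr ⟨by omega, by omega⟩⟩)⟩

lemma key (a b c d e f : Int) (rest : List Int) :
    sol6 (a :: b :: c :: d :: e :: f :: rest) = sol6_alt (a :: b :: c :: d :: e :: f :: rest) := by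
  rw [Bool.eq_iff_iff, evalA, evalB]
  exact ⟨fwd a b c d e f, bwd a b c d e f⟩

-- ===== VERDICT (by name: the statement is the Claim_ definition above) =====
theorem sol6_spec : Claim_equal_sol6 := by
  intro V _ hpre
  unfold Spec_sol6
  match V, hpre with
  | a :: b :: c :: d :: e :: f :: rest, _ => exact key a b c d e f rest
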